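-- pv_equiv track=rewrite | github.com/DavidJPavon/TrabajoPracticoPython | main.py | japones_mas_joven
-- ===== SOURCE A (Python) =====
-- def japones_mas_joven(atletas):
--   edad_minimo=9999
--   mas_joven=atletas[0]
--   for atleta in atletas:
--     edad=atleta[3]
--     pais=atleta[2]
--
--     if pais.lower()=="japon" and edad < edad_minimo:
--       edad_minimo=edad
--       mas_joven=atleta[0],atleta[1],atleta[3]
--   return mas_joven
-- ===== SOURCE B (Python) =====
-- def japones_mas_joven(atletas):
--     for a in sorted(atletas, key=lambda x: x[3]):
--         if a[2].lower() == "japon":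
--             return (a[0], a[1], a[3])
-- ===== Notes on version B (the rewrite author's own statement) =====
-- stated objective: alternative
-- what changed: Replaces the single-pass running-minimum accumulator (sentinel 9999, mutating best-so-far tuple) with sort-then-scan: stable-sort the athletes by age and return the first Japanese one encountered; stability makes the tie-breaking identical.
-- outside the precondition, e.g. on japones_mas_joven([('a', 'b', 'peru', 5)]): A returns ('a', 'b', 'peru', 5), B returns None
import Mathlib
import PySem

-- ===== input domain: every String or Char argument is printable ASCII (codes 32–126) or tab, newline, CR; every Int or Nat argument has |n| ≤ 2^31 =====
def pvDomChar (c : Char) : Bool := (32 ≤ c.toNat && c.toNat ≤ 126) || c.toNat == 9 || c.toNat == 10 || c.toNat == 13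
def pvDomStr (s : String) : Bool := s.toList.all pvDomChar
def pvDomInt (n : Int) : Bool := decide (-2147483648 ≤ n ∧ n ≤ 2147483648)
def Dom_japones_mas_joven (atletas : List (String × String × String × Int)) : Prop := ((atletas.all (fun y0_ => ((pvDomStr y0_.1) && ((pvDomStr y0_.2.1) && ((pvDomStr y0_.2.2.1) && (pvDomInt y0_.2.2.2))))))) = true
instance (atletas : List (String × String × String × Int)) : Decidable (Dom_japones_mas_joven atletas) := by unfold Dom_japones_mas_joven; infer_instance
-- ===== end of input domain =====

-- B replaces A's running-minimum accumulator loop with a different algorithm: stable-sort the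
-- athletes by age and return the first Japanese one in the sorted order (same result by stability).


-- ===== PORT A =====
-- state of A's loop: (edad_minimo, mas_joven); mas_joven is either still the initial
-- whole first athlete (Sum.inl, a 4-tuple in Python) or an updated (nombre, disciplina, edad) triple (Sum.inr)
def japones_mas_joven (atletas : List (String × String × String × Int)) : String × String × Int :=
  match PySem.List.pyGet? atletas 0 with
  | none => ("", "", 0)  -- atletas[0] raises IndexError on []; excluded by Pre_
  | some a0 =>
    let st := atletas.foldl
      (fun (st : Int × ((String × String × String × Int) ⊕ (String × String × Int))) atleta =>
        let edad := atleta.2.2.2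
        let pais := atleta.2.2.1
        if PySem.Str.lower pais == "japon" && decide (edad < st.1) then
          (edad, Sum.inr (atleta.1, atleta.2.1, atleta.2.2.2))
        else st)
      ((9999 : Int), Sum.inl a0)
    match st.2 with
    | Sum.inl a => (a.1, a.2.1, a.2.2.2)  -- here Python A returns the whole 4-tuple a (not of the declared type); excluded by Pre_
    | Sum.inr v => v

-- ===== PORT B =====
-- B: sort (stably) by age, then the for-loop returns at the first Japanese athlete
def japones_mas_joven_alt (atletas : List (String × String × String × Int)) : String × String × Int :=
  match (PySem.List.sorted atletas (fun x => x.2.2.2)).find?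
      (fun a => PySem.Str.lower a.2.2.1 == "japon") with
  | some a => (a.1, a.2.1, a.2.2.2)
  | none => ("", "", 0)  -- Python B's loop falls through and returns None; excluded by Pre_

-- ===== PRECONDITION & SPEC =====
-- Pre_ excludes the inputs with no Japanese athlete of age < 9999: there Python A returns the
-- whole first athlete, a 4-tuple that is not a value of the declared String × String × Int type
-- (and raises IndexError on []), while B returns None or the youngest Japanese athlete.
def Pre_japones_mas_joven (atletas : List (String × String × String × Int)) : Prop :=
  ∃ a ∈ atletas, PySem.Str.lower a.2.2.1 = "japon" ∧ a.2.2.2 < 9999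
instance (atletas : List (String × String × String × Int)) : Decidable (Pre_japones_mas_joven atletas) := by unfold Pre_japones_mas_joven; infer_instance
def pvWitness_japones_mas_joven : (List (String × String × String × Int)) :=
  [("ana", "judo", "Japon", 21), ("bob", "atletismo", "peru", 17)]
def Spec_japones_mas_joven (atletas : List (String × String × String × Int)) (out : String × String × Int) : Prop := out = japones_mas_joven_alt atletas
instance (atletas : List (String × String × String × Int)) (out : String × String × Int) : Decidable (Spec_japones_mas_joven atletas out) := by unfold Spec_japones_mas_joven; infer_instance

-- ===== CLAIM (what is proved, stated in full; the proofs are below) =====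
def Claim_equal_japones_mas_joven : Prop := ∀ (atletas : List (String × String × String × Int)), Dom_japones_mas_joven atletas → Pre_japones_mas_joven atletas → Spec_japones_mas_joven atletas (japones_mas_joven atletas)

-- ===== LEMMAS AND PROOFS =====

-- A's loop step restricted to a Japanese athlete (the country test already passed)
def pvStepJ (st : Int × ((String × String × String × Int) ⊕ (String × String × Int)))
    (a : String × String × String × Int) :
    Int × ((String × String × String × Int) ⊕ (String × String × Int)) :=
  if a.2.2.2 < st.1 then (a.2.2.2, Sum.inr (a.1, a.2.1, a.2.2.2)) else st

-- generic first-minimum step (keeps the earlier element on ties)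
def pvStepM {α : Type} (key : α → Int) (acc : Option α) (a : α) : Option α :=
  match acc with
  | none => some a
  | some m => if key a < key m then some a else some m

-- the coupling between A's loop state and the first-minimum accumulator
def pvRel (a0 : String × String × String × Int)
    (st : Int × ((String × String × String × Int) ⊕ (String × String × Int)))
    (acc : Option (String × String × String × Int)) : Prop :=
  (st = (9999, Sum.inl a0) ∧ (acc = none ∨ ∃ x, acc = some x ∧ (9999 : Int) ≤ x.2.2.2)) ∨
  (∃ x, acc = some x ∧ st = (x.2.2.2, Sum.inr (x.1, x.2.1, x.2.2.2)) ∧ x.2.2.2 < 9999)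

lemma pvRel_step (a0 : String × String × String × Int)
    (st : Int × ((String × String × String × Int) ⊕ (String × String × Int)))
    (acc : Option (String × String × String × Int))
    (a : String × String × String × Int)
    (h : pvRel a0 st acc) : pvRel a0 (pvStepJ st a) (pvStepM (fun x => x.2.2.2) acc a) := by
  rcases h with ⟨hst, hacc⟩ | ⟨x, hacc, hst, hlt⟩
  · subst hst
    rcases hacc with h | ⟨x, hx, hge⟩
    · subst h
      by_cases hlt : a.2.2.2 < 9999
      · right; exact ⟨a, rfl, by simp [pvStepJ, hlt], hlt⟩
      · left
        refine ⟨by simp [pvStepJ, hlt], Or.inr ⟨a, rfl, by omega⟩⟩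
    · subst hx
      by_cases hlt : a.2.2.2 < 9999
      · right
        refine ⟨a, ?_, by simp [pvStepJ, hlt], hlt⟩
        simp [pvStepM]; omega
      · left
        refine ⟨by simp [pvStepJ, hlt], Or.inr ?_⟩
        by_cases h2 : a.2.2.2 < x.2.2.2
        · exact ⟨a, by simp [pvStepM, h2], by omega⟩
        · exact ⟨x, by simp [pvStepM, h2], hge⟩
  · subst hacc hst
    by_cases h2 : a.2.2.2 < x.2.2.2
    · right; exact ⟨a, by simp [pvStepM, h2], by simp [pvStepJ, h2], by omega⟩
    · right; exact ⟨x, by simp [pvStepM, h2], by simp [pvStepJ, h2], hlt⟩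

lemma pvRel_foldl (a0 : String × String × String × Int)
    (l : List (String × String × String × Int))
    (st : Int × ((String × String × String × Int) ⊕ (String × String × Int)))
    (acc : Option (String × String × String × Int))
    (h : pvRel a0 st acc) :
    pvRel a0 (l.foldl pvStepJ st) (l.foldl (pvStepM (fun x => x.2.2.2)) acc) := by
  induction l generalizing st acc with
  | nil => exact h
  | cons a l ih => exact ih _ _ (pvRel_step a0 st acc a h)

-- the running minimum is a lower bound of the keys of all processed elements
lemma pvFold_le (l : List (String × String × String × Int))
    (st : Int × ((String × String × String × Int) ⊕ (String × String × Int))) :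
    (l.foldl pvStepJ st).1 ≤ st.1 ∧ ∀ a ∈ l, (l.foldl pvStepJ st).1 ≤ a.2.2.2 := by
  induction l generalizing st with
  | nil => simp
  | cons a l ih =>
    have h1 : (pvStepJ st a).1 ≤ st.1 ∧ (pvStepJ st a).1 ≤ a.2.2.2 := by
      by_cases h : a.2.2.2 < st.1 <;> simp [pvStepJ, h] <;> omega
    have := ih (pvStepJ st a)
    simp only [List.foldl_cons]
    refine ⟨le_trans this.1 h1.1, ?_⟩
    intro b hb
    rcases List.mem_cons.mp hb with rfl | hb
    · exact le_trans this.1 h1.2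
    · exact this.2 b hb

lemma pvStep_eq (st : Int × ((String × String × String × Int) ⊕ (String × String × Int)))
    (a : String × String × String × Int) :
    (if PySem.Str.lower a.2.2.1 == "japon" && decide (a.2.2.2 < st.1) then
        ((a.2.2.2 : Int), Sum.inr (a.1, a.2.1, a.2.2.2))
      else st)
    = if PySem.Str.lower a.2.2.1 == "japon" then pvStepJ st a else st := by
  by_cases hp : PySem.Str.lower a.2.2.1 == "japon" <;>
    by_cases hq : a.2.2.2 < st.1 <;> simp [pvStepJ, hp, hq]

-- B side: inserting x into a key-sorted list moves the first p-match exactly as the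
-- first-minimum step does (stability: on equal keys x goes after, so the earlier one wins)
lemma pvFind_insertBy {α : Type} (p : α → Bool) (key : α → Int) (x : α) (ys : List α)
    (hys : ys.Pairwise (fun a b => key a ≤ key b)) :
    (PySem.List.insertBy (fun a b => decide (key a < key b)) x ys).find? p
      = if p x then pvStepM key (ys.find? p) x else ys.find? p := by
  induction ys with
  | nil =>
    by_cases hp : p x <;> simp [PySem.List.insertBy, List.find?, pvStepM, hp]
  | cons y t ih =>
    have hy : ∀ f ∈ t, key y ≤ key f := fun f hf => List.rel_of_pairwise_cons hys hf
    have ht : t.Pairwise (fun a b => key a ≤ key b) := hys.of_cons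
    by_cases hlt : key x < key y
    · -- x is inserted in front of y
      have : PySem.List.insertBy (fun a b => decide (key a < key b)) x (y :: t)
          = x :: y :: t := by simp [PySem.List.insertBy, hlt]
      rw [this]
      by_cases hp : p x
      · cases hF : (y :: t).find? p with
        | none => simp [List.find?_cons_of_pos hp, pvStepM, hp]
        | some f =>
          have hf : f ∈ y :: t := List.mem_of_find?_eq_some hF
          have hyf : key y ≤ key f := by
            rcases List.mem_cons.mp hf with rfl | hf
            · exact le_refl _
            · exact hy f hf
          have : key x < key f := lt_of_lt_of_le hlt hyf
          simp [List.find?_cons_of_pos hp, pvStepM, hp, this]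
      · simp [List.find?_cons_of_neg hp, hp]
    · -- x goes after y
      have hins : PySem.List.insertBy (fun a b => decide (key a < key b)) x (y :: t)
          = y :: PySem.List.insertBy (fun a b => decide (key a < key b)) x t := by
        simp [PySem.List.insertBy, hlt]
      rw [hins]
      by_cases hpy : p y
      · by_cases hp : p x <;>
          simp [List.find?_cons_of_pos hpy, hp, pvStepM, hlt]
      · simp only [List.find?_cons_of_neg hpy, ih ht]

-- the first p-match of the stable sort is the conditional first-minimum fold over the list
lemma pvFind_sorted {α : Type} (p : α → Bool) (key : α → Int) (l : List α) :
    (PySem.List.sorted l key).find? p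
      = l.foldl (fun F a => if p a then pvStepM key F a else F) none := by
  induction l using List.reverseRecOn with
  | nil => simp [PySem.List.sorted]
  | append_singleton l x ih =>
    rw [PySem.List.sorted_eq_foldl_insertBy, List.foldl_append, List.foldl_append]
    simp only [List.foldl_cons, List.foldl_nil]
    rw [← PySem.List.sorted_eq_foldl_insertBy,
      pvFind_insertBy p key x _ (PySem.List.sorted_pairwise l key), ih]

-- ===== VERDICT (by name: the statement is the Claim_ definition above) =====
theorem japones_mas_joven_spec : Claim_equal_japones_mas_joven := by
  intro atletas _ hpre
  obtain ⟨w, hw, hwj, hwlt⟩ := hpre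
  unfold Spec_japones_mas_joven japones_mas_joven japones_mas_joven_alt
  -- the input list is nonempty
  obtain ⟨a0, rest, rfl⟩ : ∃ a0 rest, atletas = a0 :: rest := by
    cases atletas with
    | nil => cases hw
    | cons a0 rest => exact ⟨a0, rest, rfl⟩
  have h0 : PySem.List.pyGet? (a0 :: rest) 0 = some a0 := by
    simp [PySem.List.pyGet?, PySem.List.pyIdx?]
  simp only [h0]
  -- rewrite A's fold as a fold of pvStepJ over the filtered list
  have hstep : (fun (st : Int × ((String × String × String × Int) ⊕ (String × String × Int)))
      (atleta : String × String × String × Int) =>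
        if PySem.Str.lower atleta.2.2.1 == "japon" && decide (atleta.2.2.2 < st.1) then
          ((atleta.2.2.2 : Int), Sum.inr (atleta.1, atleta.2.1, atleta.2.2.2))
        else st)
      = (fun st atleta => if PySem.Str.lower atleta.2.2.1 == "japon" then pvStepJ st atleta else st) := by
    funext st a; exact pvStep_eq st a
  have hfoldA : (a0 :: rest).foldl
      (fun (st : Int × ((String × String × String × Int) ⊕ (String × String × Int))) atleta =>
        if PySem.Str.lower atleta.2.2.1 == "japon" && decide (atleta.2.2.2 < st.1) then
          ((atleta.2.2.2 : Int), Sum.inr (atleta.1, atleta.2.1, atleta.2.2.2))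
        else st)
      ((9999 : Int), Sum.inl a0)
      = ((a0 :: rest).filter (fun a => PySem.Str.lower a.2.2.1 == "japon")).foldl
          pvStepJ ((9999 : Int), Sum.inl a0) := by
    rw [hstep, List.foldl_filter]
  -- rewrite B's scan of the sorted list as the first-minimum fold over the same filtered list
  have hfoldB : (PySem.List.sorted (a0 :: rest) (fun x => x.2.2.2)).find?
      (fun a => PySem.Str.lower a.2.2.1 == "japon")
      = ((a0 :: rest).filter (fun a => PySem.Str.lower a.2.2.1 == "japon")).foldl
          (pvStepM (fun x => x.2.2.2)) none := by
    rw [pvFind_sorted, ← List.foldl_filter]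
  rw [hfoldA, hfoldB]
  -- the witness is in the filtered list, with age < 9999
  have hwmem : w ∈ (a0 :: rest).filter (fun a => PySem.Str.lower a.2.2.1 == "japon") := by
    rw [List.mem_filter]
    exact ⟨hw, by simp [hwj]⟩
  -- the final running minimum is < 9999
  have hmin : (((a0 :: rest).filter (fun a => PySem.Str.lower a.2.2.1 == "japon")).foldl
      pvStepJ ((9999 : Int), Sum.inl a0)).1 < 9999 := by
    have := (pvFold_le ((a0 :: rest).filter (fun a => PySem.Str.lower a.2.2.1 == "japon"))
      ((9999 : Int), Sum.inl a0)).2 w hwmem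
    omega
  -- the coupled states agree at the end
  have hrel := pvRel_foldl a0 ((a0 :: rest).filter (fun a => PySem.Str.lower a.2.2.1 == "japon"))
    ((9999 : Int), Sum.inl a0) none (Or.inl ⟨rfl, Or.inl rfl⟩)
  rcases hrel with ⟨hst, _⟩ | ⟨x, hacc, hst, _⟩
  · rw [hst] at hmin; norm_num at hmin
  · rw [hacc, hst]
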